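-- pv_equiv track=rewrite | github.com/Breno1210/Fundamentos-De-Projeto-E-Analise-De-Algoritmos | Trabalho_Individual_3/hamiltonian.py | montar_adjacencia
-- ===== SOURCE A (Python) =====
-- from typing import Dict, List, Optional
--
-- Grafo = Dict[int, List[int]]
--
-- def montar_adjacencia(n: int, arestas: List[tuple[int, int]], dirigido: bool) -> Grafo:
--     """
--     Constrói a lista de adjacência para um grafo com vértices [0..n-1].
--     Se 'dirigido' for False, adiciona arestas em ambos os sentidos.
--     """
--     adj: Grafo = {v: [] for v in range(n)}
--     for u, v in arestas:
--         if 0 <= u < n and 0 <= v < n: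
--             adj[u].append(v)
--             if not dirigido and u != v:
--                 adj[v].append(u)
--
--     # remove duplicatas e deixa execução determinística
--     for v in adj:
--         vistos = set()
--         ordenados = []
--         for w in adj[v]:
--             if w not in vistos:
--                 vistos.add(w)
--                 ordenados.append(w)
--         adj[v] = ordenados
--     return adj
-- ===== SOURCE B (Python) =====
-- def montar_adjacencia(n, arestas, dirigido):
--     """Builds each vertex's row independently in one scan of the valid edges,
--     deduplicating with dict.fromkeys, instead of mutating a shared dict and
--     running a second dedup sweep."""
--     validas = [(u, v) for (u, v) in arestas if 0 <= u < n and 0 <= v < n]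
--     adj = {}
--     for x in range(n):
--         fila = []
--         for u, v in validas:
--             if u == x:
--                 fila.append(v)
--             if not dirigido and u != v and v == x:
--                 fila.append(u)
--         adj[x] = list(dict.fromkeys(fila))
--     return adj
-- ===== Notes on version B (the rewrite author's own statement) =====
-- stated objective: alternative
-- what changed: B builds each vertex's adjacency row independently from a pre-filtered valid-edge list and deduplicates with dict.fromkeys at construction time, instead of A's interleaved mutation of one shared dict followed by a second per-vertex dedup sweep.
import Mathlib
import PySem

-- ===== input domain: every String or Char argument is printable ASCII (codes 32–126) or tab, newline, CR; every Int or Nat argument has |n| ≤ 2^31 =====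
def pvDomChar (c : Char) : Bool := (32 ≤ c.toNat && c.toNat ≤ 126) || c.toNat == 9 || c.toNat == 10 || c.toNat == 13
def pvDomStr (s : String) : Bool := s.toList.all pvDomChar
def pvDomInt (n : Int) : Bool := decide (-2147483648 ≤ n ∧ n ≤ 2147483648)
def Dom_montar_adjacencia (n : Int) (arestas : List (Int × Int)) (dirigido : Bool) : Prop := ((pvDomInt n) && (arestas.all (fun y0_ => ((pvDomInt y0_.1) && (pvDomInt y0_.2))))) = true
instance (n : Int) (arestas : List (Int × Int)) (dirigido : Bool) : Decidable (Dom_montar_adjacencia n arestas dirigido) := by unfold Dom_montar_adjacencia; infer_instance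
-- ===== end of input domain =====

-- B builds each vertex's adjacency row independently from the filtered edge list and
-- deduplicates via dict.fromkeys, instead of A's mutate-shared-dict-then-second-dedup-sweep
-- (objective: alternative decomposition, same asymptotic behaviour is NOT claimed; B is O(n*m)).


-- ===== PORT A =====
-- the inner vistos/ordenados loop of A's second sweep
def pvDedupA (ws : List Int) : List Int :=
  (ws.foldl (fun (st : PySem.Set Int × List Int) w =>
      if st.1.contains w then st else (st.1.add w, st.2 ++ [w]))
    ((PySem.Set.empty : PySem.Set Int), ([] : List Int))).2

def montar_adjacencia (n : Int) (arestas : List (Int × Int)) (dirigido : Bool) : List (Int × List Int) :=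
  let adj0 : PySem.Dict Int (List Int) :=
    (PySem.List.pyRange 0 n).foldl (fun d v => d.insert v []) PySem.Dict.empty
  let adj1 := arestas.foldl (fun d p =>
      if 0 ≤ p.1 ∧ p.1 < n ∧ 0 ≤ p.2 ∧ p.2 < n then
        let d1 := d.modify p.1 [] (fun l => l ++ [p.2])
        if ¬ dirigido ∧ p.1 ≠ p.2 then d1.modify p.2 [] (fun l => l ++ [p.1]) else d1
      else d) adj0
  let adj2 := adj1.keys.foldl (fun d v => d.insert v (pvDedupA (d.getD v []))) adj1
  adj2.items

-- ===== PORT B =====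
-- B's inner scan building one vertex's row from the valid edges
def pvFila (dirigido : Bool) (validas : List (Int × Int)) (x : Int) : List Int :=
  validas.foldl (fun fila p =>
    let fila' := if p.1 = x then fila ++ [p.2] else fila
    if ¬ dirigido ∧ p.1 ≠ p.2 ∧ p.2 = x then fila' ++ [p.1] else fila') []

def montar_adjacencia_alt (n : Int) (arestas : List (Int × Int)) (dirigido : Bool) : List (Int × List Int) :=
  let validas := arestas.filter (fun p => decide (0 ≤ p.1 ∧ p.1 < n ∧ 0 ≤ p.2 ∧ p.2 < n))
  ((PySem.List.pyRange 0 n).foldl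
     (fun d x => d.insert x (PySem.List.dedup (pvFila dirigido validas x)))
     (PySem.Dict.empty : PySem.Dict Int (List Int))).items

-- ===== PRECONDITION & SPEC =====
def Spec_montar_adjacencia (n : Int) (arestas : List (Int × Int)) (dirigido : Bool) (out : List (Int × List Int)) : Prop := out = montar_adjacencia_alt n arestas dirigido
instance (n : Int) (arestas : List (Int × Int)) (dirigido : Bool) (out : List (Int × List Int)) : Decidable (Spec_montar_adjacencia n arestas dirigido out) := by unfold Spec_montar_adjacencia; infer_instance

-- ===== CLAIM (what is proved, stated in full; the proofs are below) =====
def Claim_equal_montar_adjacencia : Prop := ∀ (n : Int) (arestas : List (Int × Int)) (dirigido : Bool), Dom_montar_adjacencia n arestas dirigido → Spec_montar_adjacencia n arestas dirigido (montar_adjacencia n arestas dirigido)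

-- ===== LEMMAS AND PROOFS =====

-- per-edge contribution of a (valid) edge p to the row of vertex x
def pvContrib (dirigido : Bool) (p : Int × Int) (x : Int) : List Int :=
  (if p.1 = x then [p.2] else []) ++ (if ¬ dirigido ∧ p.1 ≠ p.2 ∧ p.2 = x then [p.1] else [])

theorem pvFila_go (dirigido : Bool) (x : Int) :
    ∀ (vs : List (Int × Int)) (acc : List Int),
      vs.foldl (fun fila p =>
        let fila' := if p.1 = x then fila ++ [p.2] else fila
        if ¬ dirigido ∧ p.1 ≠ p.2 ∧ p.2 = x then fila' ++ [p.1] else fila') acc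
      = acc ++ vs.flatMap (fun p => pvContrib dirigido p x) := by
  intro vs
  induction vs with
  | nil => simp
  | cons p t ih =>
    intro acc
    simp only [List.foldl_cons, List.flatMap_cons, ih]
    simp only [pvContrib]
    split_ifs <;> subst_vars <;> first | rfl | omega | tauto | simp

theorem pvFila_eq (dirigido : Bool) (vs : List (Int × Int)) (x : Int) :
    pvFila dirigido vs x = vs.flatMap (fun p => pvContrib dirigido p x) := by
  unfold pvFila
  rw [pvFila_go dirigido x vs []]
  simp

theorem pvDedupA_go :
    ∀ (ws : List Int) (s : PySem.Set Int) (o : List Int), s = o →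
      (ws.foldl (fun (st : PySem.Set Int × List Int) w =>
         if st.1.contains w then st else (st.1.add w, st.2 ++ [w])) (s, o)).2
      = ws.foldl PySem.Set.add o := by
  intro ws
  induction ws with
  | nil => intro s o h; simp
  | cons w t ih =>
    intro s o h
    subst h
    by_cases hc : (s : List Int).contains w = true
    · rw [List.foldl_cons, List.foldl_cons, if_pos hc,
        show PySem.Set.add s w = s from by unfold PySem.Set.add; rw [if_pos hc]]
      exact ih s s rfl
    · rw [List.foldl_cons, List.foldl_cons, if_neg hc,
        show PySem.Set.add s w = s ++ [w] from by unfold PySem.Set.add; rw [if_neg hc]]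
      exact ih _ _ rfl

theorem pvDedupA_eq (ws : List Int) : pvDedupA ws = PySem.List.dedup ws := by
  unfold pvDedupA PySem.List.dedup PySem.Set.ofList
  exact pvDedupA_go ws _ _ rfl

-- items of a dict with distinct keys is the map of getD over its keys
theorem pvItems_eq_map_keys (d : PySem.Dict Int (List Int)) (h : d.keys.Nodup) :
    d.items = d.keys.map (fun k => (k, d.getD k [])) := by
  have hk : d.keys = d.items.map (·.1) := rfl
  rw [hk, List.map_map]
  have : ∀ p ∈ d.items, ((fun k => (k, d.getD k [])) ∘ (·.1)) p = id p := by
    rintro ⟨k, v⟩ hp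
    simp [PySem.Dict.getD_of_mem_items d hp h]
  rw [List.map_congr_left this, List.map_id]

-- A's init loop: items are [(v, []) for v in range(n)]
theorem pvAdj0_items (n : Int) :
    ((PySem.List.pyRange 0 n).foldl (fun d v => d.insert v ([] : List Int)) PySem.Dict.empty).items
      = (PySem.List.pyRange 0 n).map (fun v => (v, ([] : List Int))) := by
  have := PySem.Dict.items_foldl_insert_fresh (PySem.List.pyRange 0 n) (fun v => v)
      (fun _ => ([] : List Int)) (PySem.Dict.empty)
      (by intro a _; exact PySem.Dict.contains_empty a)
      (by simpa using PySem.List.nodup_pyRange_one 0 n)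
  simpa using this

theorem pvAdj0_keys (n : Int) :
    ((PySem.List.pyRange 0 n).foldl (fun d v => d.insert v ([] : List Int)) PySem.Dict.empty).keys
      = PySem.List.pyRange 0 n := by
  have hk : ∀ (d : PySem.Dict Int (List Int)), d.keys = d.items.map (·.1) := fun _ => rfl
  rw [hk, pvAdj0_items]
  simp [Function.comp_def]

theorem pvAdj0_getD (n : Int) (x : Int) :
    ((PySem.List.pyRange 0 n).foldl (fun d v => d.insert v ([] : List Int)) PySem.Dict.empty).getD x []
      = [] := by
  set d := (PySem.List.pyRange 0 n).foldl (fun d v => d.insert v ([] : List Int)) PySem.Dict.empty with hd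
  by_cases hc : d.contains x
  · have hx : x ∈ d.keys := (PySem.Dict.contains_iff_mem_keys d x).mp hc
    rw [hd, pvAdj0_keys] at hx
    have hnd : d.keys.Nodup := by
      rw [hd, pvAdj0_keys]; exact PySem.List.nodup_pyRange_one 0 n
    have hmem : (x, ([] : List Int)) ∈ d.items := by
      rw [hd, pvAdj0_items]
      exact List.mem_map.mpr ⟨x, hx, rfl⟩
    exact PySem.Dict.getD_of_mem_items d hmem hnd []
  · exact PySem.Dict.getD_of_not_contains d [] (by simpa using hc)

-- A's edge loop: keys are preserved and each row accumulates the contributions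
set_option maxRecDepth 8192 in
theorem pvEdgeLoop (n : Int) (dirigido : Bool) :
    ∀ (l : List (Int × Int)) (d : PySem.Dict Int (List Int)), d.keys = PySem.List.pyRange 0 n →
      (l.foldl (fun d p =>
          if 0 ≤ p.1 ∧ p.1 < n ∧ 0 ≤ p.2 ∧ p.2 < n then
            let d1 := d.modify p.1 [] (fun l => l ++ [p.2])
            if ¬ dirigido ∧ p.1 ≠ p.2 then d1.modify p.2 [] (fun l => l ++ [p.1]) else d1
          else d) d).keys = PySem.List.pyRange 0 n ∧
      ∀ x, (l.foldl (fun d p =>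
          if 0 ≤ p.1 ∧ p.1 < n ∧ 0 ≤ p.2 ∧ p.2 < n then
            let d1 := d.modify p.1 [] (fun l => l ++ [p.2])
            if ¬ dirigido ∧ p.1 ≠ p.2 then d1.modify p.2 [] (fun l => l ++ [p.1]) else d1
          else d) d).getD x []
        = d.getD x [] ++ (l.filter (fun p => decide (0 ≤ p.1 ∧ p.1 < n ∧ 0 ≤ p.2 ∧ p.2 < n))).flatMap (fun p => pvContrib dirigido p x) := by
  intro l
  induction l with
  | nil => intro d hk; exact ⟨hk, by simp⟩
  | cons p t ih =>
    intro d hk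
    have key : ∀ (e : PySem.Dict Int (List Int)) (c : Int → List Int), e.keys = PySem.List.pyRange 0 n →
        (∀ x, e.getD x [] = d.getD x [] ++ c x) →
        (t.foldl (fun d p =>
            if 0 ≤ p.1 ∧ p.1 < n ∧ 0 ≤ p.2 ∧ p.2 < n then
              let d1 := d.modify p.1 [] (fun l => l ++ [p.2])
              if ¬ dirigido ∧ p.1 ≠ p.2 then d1.modify p.2 [] (fun l => l ++ [p.1]) else d1
            else d) e).keys = PySem.List.pyRange 0 n ∧
        ∀ x, (t.foldl (fun d p =>
            if 0 ≤ p.1 ∧ p.1 < n ∧ 0 ≤ p.2 ∧ p.2 < n then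
              let d1 := d.modify p.1 [] (fun l => l ++ [p.2])
              if ¬ dirigido ∧ p.1 ≠ p.2 then d1.modify p.2 [] (fun l => l ++ [p.1]) else d1
            else d) e).getD x []
          = d.getD x [] ++ (c x ++ (t.filter (fun p => decide (0 ≤ p.1 ∧ p.1 < n ∧ 0 ≤ p.2 ∧ p.2 < n))).flatMap (fun p => pvContrib dirigido p x)) := by
      intro e c h1 h2
      obtain ⟨ihk, ihg⟩ := ih e h1
      exact ⟨ihk, fun x => by rw [ihg x, h2 x, List.append_assoc]⟩
    simp only [List.foldl_cons]
    by_cases hv : 0 ≤ p.1 ∧ p.1 < n ∧ 0 ≤ p.2 ∧ p.2 < n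
    · have hc1 : d.contains p.1 = true := by
        rw [PySem.Dict.contains_iff_mem_keys, hk, PySem.List.mem_pyRange_one]
        exact ⟨hv.1, hv.2.1⟩
      have hkeys1 : (d.modify p.1 [] (fun l => l ++ [p.2])).keys = PySem.List.pyRange 0 n := by
        rw [PySem.Dict.keys_modify, PySem.Dict.keys_insert_of_contains _ _ hc1, hk]
      have hc2 : (d.modify p.1 [] (fun l => l ++ [p.2])).contains p.2 = true := by
        rw [PySem.Dict.contains_iff_mem_keys, hkeys1, PySem.List.mem_pyRange_one]
        exact ⟨hv.2.2.1, hv.2.2.2⟩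
      rw [if_pos hv]
      split_ifs with hcnd
      · obtain ⟨kk, kg⟩ := key ((d.modify p.1 [] (fun l => l ++ [p.2])).modify p.2 [] (fun l => l ++ [p.1]))
          (fun x => pvContrib dirigido p x)
          (by rw [PySem.Dict.keys_modify, PySem.Dict.keys_insert_of_contains _ _ hc2, hkeys1])
          (fun x => by
            clear key ih hc1 hkeys1 hc2 hk
            obtain ⟨hnd, hne⟩ := hcnd
            simp only [PySem.Dict.getD_modify, pvContrib]
            split_ifs <;> subst_vars <;> first | rfl | omega | tauto | simp)
        refine ⟨kk, fun x => ?_⟩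
        rw [kg x, List.filter_cons, if_pos (by simpa using hv)]
        simp
      · obtain ⟨kk, kg⟩ := key (d.modify p.1 [] (fun l => l ++ [p.2]))
          (fun x => pvContrib dirigido p x) hkeys1
          (fun x => by
            clear key ih hc1 hkeys1 hc2 hk
            simp only [PySem.Dict.getD_modify, pvContrib]
            split_ifs <;> subst_vars <;> first | rfl | omega | tauto | simp)
        refine ⟨kk, fun x => ?_⟩
        rw [kg x, List.filter_cons, if_pos (by simpa using hv)]
        simp
    · rw [if_neg hv]
      obtain ⟨kk, kg⟩ := key d (fun _ => []) hk (fun x => by simp)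
      refine ⟨kk, fun x => ?_⟩
      rw [kg x, List.filter_cons, if_neg (by simpa using hv)]
      simp

-- A's dedup sweep: keys preserved, rows deduplicated (each key is visited once)
theorem pvSweep (ks : List Int) :
    ∀ (d : PySem.Dict Int (List Int)), ks.Nodup → (∀ k ∈ ks, d.contains k = true) →
      (ks.foldl (fun d v => d.insert v (pvDedupA (d.getD v []))) d).keys = d.keys ∧
      ∀ x, (ks.foldl (fun d v => d.insert v (pvDedupA (d.getD v []))) d).getD x []
        = if x ∈ ks then pvDedupA (d.getD x []) else d.getD x [] := by
  induction ks with
  | nil => intro d _ _; simp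
  | cons k t ih =>
    intro d hnd hmem
    have hck : d.contains k = true := hmem k (by simp)
    set d1 := d.insert k (pvDedupA (d.getD k [])) with hd1
    have hkeys1 : d1.keys = d.keys := PySem.Dict.keys_insert_of_contains d _ hck
    have hmem1 : ∀ x ∈ t, d1.contains x = true := by
      intro x hx
      rw [PySem.Dict.contains_iff_mem_keys, hkeys1, ← PySem.Dict.contains_iff_mem_keys]
      exact hmem x (List.mem_cons_of_mem _ hx)
    obtain ⟨ihk, ihg⟩ := ih d1 hnd.of_cons hmem1
    have hknotint : k ∉ t := (List.nodup_cons.mp hnd).1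
    constructor
    · simp only [List.foldl_cons, ← hd1, ihk, hkeys1]
    · intro x
      simp only [List.foldl_cons, ← hd1, ihg x]
      by_cases hxt : x ∈ t
      · have hxk : x ≠ k := fun h => hknotint (h ▸ hxt)
        simp [hxt, hd1, PySem.Dict.getD_insert, hxk]
      · by_cases hxk : x = k
        · subst hxk
          simp [hxt, hd1]
        · simp [hxt, hxk, hd1, PySem.Dict.getD_insert]

-- B's build loop: the whole result as a map over the range
theorem pvAlt_items (n : Int) (arestas : List (Int × Int)) (dirigido : Bool) :
    montar_adjacencia_alt n arestas dirigido
      = (PySem.List.pyRange 0 n).map (fun x => (x,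
          PySem.List.dedup (pvFila dirigido (arestas.filter (fun p => decide (0 ≤ p.1 ∧ p.1 < n ∧ 0 ≤ p.2 ∧ p.2 < n))) x))) := by
  unfold montar_adjacencia_alt
  have := PySem.Dict.items_foldl_insert_fresh (PySem.List.pyRange 0 n) (fun x => x)
      (fun x => PySem.List.dedup (pvFila dirigido (arestas.filter (fun p => decide (0 ≤ p.1 ∧ p.1 < n ∧ 0 ≤ p.2 ∧ p.2 < n))) x))
      (PySem.Dict.empty)
      (by intro a _; exact PySem.Dict.contains_empty a)
      (by simpa using PySem.List.nodup_pyRange_one 0 n)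
  simpa using this

-- ===== VERDICT (by name: the statement is the Claim_ definition above) =====
theorem montar_adjacencia_spec : Claim_equal_montar_adjacencia := by
  intro n arestas dirigido _
  unfold Spec_montar_adjacencia
  rw [pvAlt_items]
  unfold montar_adjacencia
  set adj0 := (PySem.List.pyRange 0 n).foldl (fun d v => d.insert v ([] : List Int)) PySem.Dict.empty with hadj0
  obtain ⟨hk1, hg1⟩ := pvEdgeLoop n dirigido arestas adj0 (pvAdj0_keys n)
  set adj1 := arestas.foldl _ adj0 with hadj1
  have hnd1 : adj1.keys.Nodup := by rw [hk1]; exact PySem.List.nodup_pyRange_one 0 n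
  have hmem1 : ∀ k ∈ adj1.keys, adj1.contains k = true := by
    intro k hkk; exact (PySem.Dict.contains_iff_mem_keys adj1 k).mpr hkk
  obtain ⟨hk2, hg2⟩ := pvSweep adj1.keys adj1 hnd1 hmem1
  set adj2 := adj1.keys.foldl (fun d v => d.insert v (pvDedupA (d.getD v []))) adj1 with hadj2
  have hnd2 : adj2.keys.Nodup := by rw [hk2]; exact hnd1
  rw [pvItems_eq_map_keys adj2 hnd2, hk2, hk1]
  apply List.map_congr_left
  intro x hx
  have hxk : x ∈ adj1.keys := by rw [hk1]; exact hx
  rw [hg2 x, if_pos hxk, hg1 x, pvAdj0_getD n x, List.nil_append, pvDedupA_eq,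
    pvFila_eq]
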